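-- pv_equiv track=rewrite | github.com/MrBrantCode/unitest_baseline | mut_generate/mist_train_cf/cf_17286/solution.py | check_increasing_subsequence
-- ===== SOURCE A (Python) =====
-- def check_increasing_subsequence(numbers):
--     if len(numbers) < 5:
--         return False
--
--     increasing_count = 1  # keeps track of the count of increasing numbers in the subsequence
--     last_number = numbers[0]  # keeps track of the last number in the subsequence
--
--     for i in range(1, len(numbers)):
--         if numbers[i] > last_number:
--             increasing_count += 1
--             last_number = numbers[i]
--             if increasing_count == 5:
--                 return True
--         elif numbers[i] < last_number:
--             increasing_count = 1
--             last_number = numbers[i]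
--
--     return False
-- ===== SOURCE B (Python) =====
-- def check_increasing_subsequence(numbers):
--     reduced = []
--     for x in numbers:
--         if not reduced or x != reduced[-1]:
--             reduced.append(x)
--     run = 1
--     for prev, cur in zip(reduced, reduced[1:]):
--         run = run + 1 if cur > prev else 1
--         if run == 5:
--             return True
--     return False
-- ===== Notes on version B (the rewrite author's own statement) =====
-- stated objective: alternative
-- what changed: B first collapses consecutive duplicates into a reduced list, then scans that list's adjacent pairs once counting the current strictly-increasing run, instead of A's single loop over all elements with a carried last_number that silently skips equal elements; B also needs no leading length guard.
import Mathlib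
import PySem

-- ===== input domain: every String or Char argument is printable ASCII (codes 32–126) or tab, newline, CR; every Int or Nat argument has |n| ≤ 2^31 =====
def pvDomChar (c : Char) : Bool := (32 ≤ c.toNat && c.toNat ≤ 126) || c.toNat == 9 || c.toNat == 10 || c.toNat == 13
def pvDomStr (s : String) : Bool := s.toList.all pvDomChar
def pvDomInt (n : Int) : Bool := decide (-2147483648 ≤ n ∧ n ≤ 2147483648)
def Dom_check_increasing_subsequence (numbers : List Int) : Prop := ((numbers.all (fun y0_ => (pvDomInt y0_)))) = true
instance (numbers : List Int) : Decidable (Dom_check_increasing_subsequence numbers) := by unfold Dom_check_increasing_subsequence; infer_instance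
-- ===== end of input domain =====

-- B removes consecutive duplicates first and then scans the reduced list once for a
-- strictly increasing run of length 5 (alternative decomposition, same O(n) cost).

-- ===== PORT A =====
-- A's loop over numbers[1:] with state (increasing_count, last_number)
def aLoop (c : Int) (last : Int) : List Int → Bool
  | [] => false
  | x :: xs =>
    if x > last then
      (if c + 1 = 5 then true else aLoop (c + 1) x xs)
    else if x < last then aLoop 1 x xs
    else aLoop c last xs

def check_increasing_subsequence (numbers : List Int) : Bool :=
  if numbers.length < 5 then false
  else
    match numbers with
    | [] => false
    | x :: xs => aLoop 1 x xs

-- ===== PORT B =====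
-- first loop of Source B: keep x when reduced is empty or x ≠ reduced[-1]
-- (the accumulator `lastKept` is `reduced[-1]`, none while reduced is empty)
def bReduce (lastKept : Option Int) : List Int → List Int
  | [] => []
  | x :: xs =>
    match lastKept with
    | none => x :: bReduce (some x) xs
    | some l => if x ≠ l then x :: bReduce (some x) xs else bReduce (some l) xs

-- second loop of Source B: over zip(reduced, reduced[1:]); `prev` is carried, `cur` is the head
def bScan (run : Int) (prev : Int) : List Int → Bool
  | [] => false
  | cur :: rest =>
    let r := if cur > prev then run + 1 else 1
    if r = 5 then true else bScan r cur rest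

def check_increasing_subsequence_alt (numbers : List Int) : Bool :=
  match bReduce none numbers with
  | [] => false
  | x :: rest => bScan 1 x rest

-- ===== PRECONDITION & SPEC =====
def Spec_check_increasing_subsequence (numbers : List Int) (out : Bool) : Prop := out = check_increasing_subsequence_alt numbers
instance (numbers : List Int) (out : Bool) : Decidable (Spec_check_increasing_subsequence numbers out) := by unfold Spec_check_increasing_subsequence; infer_instance

-- ===== CLAIM (what is proved, stated in full; the proofs are below) =====
def Claim_equal_check_increasing_subsequence : Prop := ∀ (numbers : List Int), Dom_check_increasing_subsequence numbers → Spec_check_increasing_subsequence numbers (check_increasing_subsequence numbers)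

-- ===== LEMMAS AND PROOFS =====

-- A's loop equals B's scan over the deduplicated tail.
theorem aLoop_eq_bScan (xs : List Int) : ∀ (c last : Int),
    aLoop c last xs = bScan c last (bReduce (some last) xs) := by
  induction xs with
  | nil => intro c last; simp [aLoop, bReduce, bScan]
  | cons x xs ih =>
    intro c last
    rcases lt_trichotomy last x with h | h | h
    · have hne : x ≠ last := ne_of_gt h
      simp only [aLoop, bReduce, hne, if_pos h, bScan, ne_eq,
        not_false_eq_true, if_true]
      split
      · rfl
      · exact ih (c + 1) x
    · subst h
      simp [aLoop, bReduce, ih c last]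
    · have hne : x ≠ last := ne_of_lt h
      have hng : ¬ x > last := not_lt.mpr h.le
      simp only [aLoop, bReduce, if_neg hng, if_pos h, hne, ne_eq,
        not_false_eq_true, if_true, bScan]
      have h15 : (1 : Int) ≠ 5 := by decide
      simp only [if_neg h15]
      exact ih 1 x

theorem bReduce_length_le (xs : List Int) : ∀ (o : Option Int),
    (bReduce o xs).length ≤ xs.length := by
  induction xs with
  | nil => intro o; simp [bReduce]
  | cons x xs ih =>
    intro o
    cases o with
    | none => simpa [bReduce] using ih (some x)
    | some l =>
      by_cases h : x = l
      · simp [bReduce, h]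
        exact Nat.le_succ_of_le (ih (some l))
      · simpa [bReduce, h] using ih (some x)

-- a short scan starting at run c ≥ 1 with c + length < 5 stays false
theorem bScan_short (ys : List Int) : ∀ (c prev : Int),
    1 ≤ c → c + ys.length < 5 → bScan c prev ys = false := by
  induction ys with
  | nil => intro c prev _ _; simp [bScan]
  | cons y ys ih =>
    intro c prev hc hlen
    simp only [List.length_cons] at hlen
    have hlen' : c + ys.length < 4 := by push_cast at hlen ⊢; omega
    by_cases h : y > prev
    · have h5 : c + 1 ≠ 5 := by omega
      simp only [bScan, if_pos h, if_neg h5]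
      exact ih (c + 1) y (by omega) (by omega)
    · simp only [bScan, if_neg h]
      have h15 : (1 : Int) ≠ 5 := by decide
      simp only [if_neg h15]
      exact ih 1 y (by omega) (by omega)

-- ===== VERDICT (by name: the statement is the Claim_ definition above) =====
theorem check_increasing_subsequence_spec : Claim_equal_check_increasing_subsequence := by
  intro numbers _
  unfold Spec_check_increasing_subsequence check_increasing_subsequence check_increasing_subsequence_alt
  by_cases hlen : numbers.length < 5
  · simp only [if_pos hlen]
    cases numbers with
    | nil => simp [bReduce]
    | cons x xs =>
      simp only [bReduce]
      have hle := bReduce_length_le xs (some x)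
      have := bScan_short (bReduce (some x) xs) 1 x (by omega)
        (by simp only [List.length_cons] at hlen; omega)
      simp [this]
  · simp only [if_neg hlen]
    cases numbers with
    | nil => simp at hlen
    | cons x xs =>
      simp only [bReduce]
      exact aLoop_eq_bScan xs 1 x
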